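-- pv_equiv track=rewrite | github.com/vanes11/QuickFill | version1.py | SizeNoeud
-- ===== SOURCE A (Python) =====
-- def SizeNoeud(n,W):
--     size = 0
--     if n ==0 :
--         return 1
--     else:
--         for i in range(n):
--             if (i,n) in W.keys():
--                 size = size + SizeNoeud(i,W)*(len(W[(i,n)])) # +1 parceque on ajoute l'expression atomique ConstStr dans la construction de w
--
--     return size
-- ===== SOURCE B (Python) =====
-- def SizeNoeud(n, W):
--     memo = {}
--
--     def size(m):
--         if m == 0:
--             return 1
--         if m in memo:
--             return memo[m]
--         total = 0
--         for i in range(m):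
--             if (i, m) in W:
--                 total += size(i) * len(W[(i, m)])
--         memo[m] = total
--         return total
--
--     return size(n)
-- ===== Notes on version B (the rewrite author's own statement) =====
-- stated objective: alternative
-- what changed: Replaces A's naive top-down recursion (which re-solves the same node once per path reaching it, exponentially often on dense W) with a memoized dynamic-programming version that computes each node's size exactly once.
import Mathlib
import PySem

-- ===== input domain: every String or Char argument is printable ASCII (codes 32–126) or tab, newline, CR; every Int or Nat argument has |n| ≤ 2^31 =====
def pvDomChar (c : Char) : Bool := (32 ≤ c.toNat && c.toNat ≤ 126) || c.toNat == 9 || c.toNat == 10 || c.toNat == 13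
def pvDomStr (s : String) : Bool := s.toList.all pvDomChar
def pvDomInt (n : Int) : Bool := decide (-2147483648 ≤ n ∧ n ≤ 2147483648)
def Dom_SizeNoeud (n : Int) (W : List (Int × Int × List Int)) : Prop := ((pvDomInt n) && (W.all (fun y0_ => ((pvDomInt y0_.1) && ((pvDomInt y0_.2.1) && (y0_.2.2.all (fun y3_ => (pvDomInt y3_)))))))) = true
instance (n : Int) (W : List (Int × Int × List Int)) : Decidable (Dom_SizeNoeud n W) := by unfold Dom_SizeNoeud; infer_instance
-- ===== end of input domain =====

-- B memoizes A's recursion (dynamic programming: each node's size is computed exactly once instead of being re-solved per path).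

-- shared dict primitive: '(i,k) in W' / 'W[(i,k)]' on the flattened association list (first match = dict lookup)
def wGet? (W : List (Int × Int × List Int)) (i k : Int) : Option (List Int) :=
  (W.find? (fun e => e.1 == i && e.2.1 == k)).map (fun e => e.2.2)

-- ===== PORT A =====
def SizeNoeud (n : Int) (W : List (Int × Int × List Int)) : Int :=
  if n = 0 then 1
  else
    -- for i in range(n): if (i,n) in W: size += SizeNoeud(i,W)*len(W[(i,n)])
    (PySem.List.pyRange 0 n 1).attach.foldl
      (fun size i =>
        match wGet? W i.1 n with
        | some v => size + SizeNoeud i.1 W * (v.length : Int)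
        | none => size) 0
termination_by n.toNat
decreasing_by
  have h := PySem.List.mem_pyRange_one.mp i.2
  omega

-- ===== PORT B =====
-- helper 'size(m)' of B, with the mutable dict 'memo' threaded through explicitly
def pvGo (W : List (Int × Int × List Int)) (m : Int) (memo : PySem.Dict Int Int) : Int × PySem.Dict Int Int :=
  if m = 0 then (1, memo)
  else
    match PySem.Dict.get? memo m with
    | some v => (v, memo)                     -- if m in memo: return memo[m]
    | none =>
      let p :=
        (PySem.List.pyRange 0 m 1).attach.foldl
          (fun (p : Int × PySem.Dict Int Int) i =>
            match wGet? W i.1 m with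
            | some v =>
              let r := pvGo W i.1 p.2
              (p.1 + r.1 * (v.length : Int), r.2)
            | none => p)
          (0, memo)
      (p.1, PySem.Dict.insert p.2 m p.1)      -- memo[m] = total
termination_by m.toNat
decreasing_by
  have h := PySem.List.mem_pyRange_one.mp i.2
  omega

def SizeNoeud_alt (n : Int) (W : List (Int × Int × List Int)) : Int :=
  (pvGo W n PySem.Dict.empty).1

-- ===== PRECONDITION & SPEC =====
def Spec_SizeNoeud (n : Int) (W : List (Int × Int × List Int)) (out : Int) : Prop := out = SizeNoeud_alt n W
instance (n : Int) (W : List (Int × Int × List Int)) (out : Int) : Decidable (Spec_SizeNoeud n W out) := by unfold Spec_SizeNoeud; infer_instance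

-- ===== CLAIM (what is proved, stated in full; the proofs are below) =====
def Claim_equal_SizeNoeud : Prop := ∀ (n : Int) (W : List (Int × Int × List Int)), Dom_SizeNoeud n W → Spec_SizeNoeud n W (SizeNoeud n W)

-- ===== LEMMAS AND PROOFS =====

-- invariant: every memoised entry is the corresponding SizeNoeud value
def pvInv (W : List (Int × Int × List Int)) (memo : PySem.Dict Int Int) : Prop :=
  ∀ j v, memo.get? j = some v → v = SizeNoeud j W

-- B's loop over range(m) computes A's loop value and preserves the invariant,
-- assuming correctness of pvGo below m (the induction hypothesis, taken as an argument)
theorem pvFold (W : List (Int × Int × List Int)) (m : Int)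
    (IH : ∀ i, 0 ≤ i → i < m → ∀ memo, pvInv W memo →
      (pvGo W i memo).1 = SizeNoeud i W ∧ pvInv W (pvGo W i memo).2) :
    ∀ (l : List {x // x ∈ PySem.List.pyRange 0 m 1}) (acc : Int) (memo : PySem.Dict Int Int),
      pvInv W memo →
      (l.foldl
          (fun (p : Int × PySem.Dict Int Int) i =>
            match wGet? W i.1 m with
            | some v =>
              let r := pvGo W i.1 p.2
              (p.1 + r.1 * (v.length : Int), r.2)
            | none => p)
          (acc, memo)).1
        = l.foldl
            (fun size i =>
              match wGet? W i.1 m with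
              | some v => size + SizeNoeud i.1 W * (v.length : Int)
              | none => size) acc
      ∧ pvInv W (l.foldl
          (fun (p : Int × PySem.Dict Int Int) i =>
            match wGet? W i.1 m with
            | some v =>
              let r := pvGo W i.1 p.2
              (p.1 + r.1 * (v.length : Int), r.2)
            | none => p)
          (acc, memo)).2 := by
  intro l
  induction l with
  | nil => intro acc memo hm; exact ⟨rfl, hm⟩
  | cons i t iht =>
      intro acc memo hm
      have hi := PySem.List.mem_pyRange_one.mp i.2
      simp only [List.foldl_cons]
      cases hw : wGet? W i.1 m with
      | none => simpa [hw] using iht acc memo hm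
      | some v =>
          obtain ⟨h1, h2⟩ := IH i.1 hi.1 hi.2 memo hm
          simpa [hw, h1] using iht (acc + SizeNoeud i.1 W * (v.length : Int)) (pvGo W i.1 memo).2 h2

-- one step of pvGo is correct given correctness below m
theorem pvGo_step (W : List (Int × Int × List Int)) (m : Int) (memo : PySem.Dict Int Int)
    (IH : ∀ i, 0 ≤ i → i < m → ∀ memo', pvInv W memo' →
      (pvGo W i memo').1 = SizeNoeud i W ∧ pvInv W (pvGo W i memo').2)
    (hm : pvInv W memo) :
    (pvGo W m memo).1 = SizeNoeud m W ∧ pvInv W (pvGo W m memo).2 := by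
  rw [pvGo]
  by_cases h0 : m = 0
  · subst h0
    rw [SizeNoeud]
    simp [hm]
  · rw [if_neg h0]
    cases hget : PySem.Dict.get? memo m with
    | some v => exact ⟨hm _ _ hget, hm⟩
    | none =>
        obtain ⟨h1, h2⟩ := pvFold W m IH (PySem.List.pyRange 0 m 1).attach 0 memo hm
        have hval : (SizeNoeud m W) =
            ((PySem.List.pyRange 0 m 1).attach.foldl
              (fun size i =>
                match wGet? W i.1 m with
                | some v => size + SizeNoeud i.1 W * (v.length : Int)
                | none => size) 0) := by
          rw [SizeNoeud, if_neg h0]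
        refine ⟨by rw [h1, ← hval], ?_⟩
        intro j v hj
        rw [PySem.Dict.get?_insert] at hj
        by_cases hjm : j = m
        · rw [if_pos hjm] at hj
          cases hj
          rw [h1, ← hval, hjm]
        · rw [if_neg hjm] at hj
          exact h2 _ _ hj

-- pvGo is correct on every input, by strong induction on m.toNat
theorem pvGo_correct (W : List (Int × Int × List Int)) :
    ∀ (N : Nat) (m : Int), m.toNat ≤ N → ∀ (memo : PySem.Dict Int Int), pvInv W memo →
      (pvGo W m memo).1 = SizeNoeud m W ∧ pvInv W (pvGo W m memo).2 := by
  intro N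
  induction N with
  | zero =>
      intro m hN memo hm
      exact pvGo_step W m memo (fun i hi0 him _ _ => by omega) hm
  | succ N ihN =>
      intro m hN memo hm
      exact pvGo_step W m memo
        (fun i hi0 him memo' hm' => ihN i (by omega) memo' hm') hm

theorem pvInv_empty (W : List (Int × Int × List Int)) : pvInv W PySem.Dict.empty := by
  intro j v hj
  simp [PySem.Dict.empty, PySem.Dict.get?] at hj

-- ===== VERDICT (by name: the statement is the Claim_ definition above) =====
theorem SizeNoeud_spec : Claim_equal_SizeNoeud := by
  intro n W _
  unfold Spec_SizeNoeud SizeNoeud_alt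
  exact (pvGo_correct W n.toNat n (le_refl _) PySem.Dict.empty (pvInv_empty W)).1.symm
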